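-- pv_equiv track=rewrite | github.com/MrBrantCode/unitest_baseline | mut_generate/mist_train_taco/taco_18144/solution.py | filter_noise_words
-- ===== SOURCE A (Python) =====
-- def filter_noise_words(S: str) -> str:
--     noise = ''
--     output = ''
--     i = 0
--     j = 0
--     while i < len(S):
--         if S[i:i + 3] == 'ada':
--             output += S[j:i]
--             j = i
--             i += 3
--             while i + 1 < len(S) and S[i:i + 2] == 'da':
--                 i += 2
--             noise += S[j:i]
--             j = i
--         else:
--             i += 1
--     output += S[j:i]
--     return output + noise
-- ===== SOURCE B (Python) =====
-- def filter_noise_words(S: str) -> str: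
--     # Single left-to-right pass with a 5-state automaton (no slicing, no index
--     # arithmetic): states 0=plain, 1=seen 'a', 2=seen 'ad', 3=inside noise after
--     # a complete 'ada'(+'da'*), 4=inside noise having just seen a dangling 'd'.
--     st = 0
--     out = []
--     noise = []
--
--     def step0(c):
--         nonlocal st
--         if c == 'a':
--             st = 1
--         else:
--             out.append(c)
--
--     for c in S:
--         if st == 0:
--             step0(c)
--         elif st == 1:
--             if c == 'd':
--                 st = 2
--             else:
--                 out.append('a')
--                 st = 0
--                 step0(c)
--         elif st == 2:
--             if c == 'a':
--                 st = 3
--                 noise.append('ada')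
--             else:
--                 out.append('ad')
--                 st = 0
--                 step0(c)
--         elif st == 3:
--             if c == 'd':
--                 st = 4
--             else:
--                 st = 0
--                 step0(c)
--         else:  # st == 4
--             if c == 'a':
--                 st = 3
--                 noise.append('da')
--             else:
--                 out.append('d')
--                 st = 0
--                 step0(c)
--     if st == 1:
--         out.append('a')
--     elif st == 2:
--         out.append('ad')
--     elif st == 4:
--         out.append('d')
--     return ''.join(out) + ''.join(noise)
-- ===== Notes on version B (the rewrite author's own statement) =====
-- stated objective: alternative
-- what changed: A's two-pointer scan with string slicing (S[i:i+3] comparisons, nested 'da' loop, slice copies and repeated string concatenation) is replaced by a single char-at-a-time pass through a five-state finite automaton that never slices or indexes, appending to lists joined once at the end.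
import Mathlib
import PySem

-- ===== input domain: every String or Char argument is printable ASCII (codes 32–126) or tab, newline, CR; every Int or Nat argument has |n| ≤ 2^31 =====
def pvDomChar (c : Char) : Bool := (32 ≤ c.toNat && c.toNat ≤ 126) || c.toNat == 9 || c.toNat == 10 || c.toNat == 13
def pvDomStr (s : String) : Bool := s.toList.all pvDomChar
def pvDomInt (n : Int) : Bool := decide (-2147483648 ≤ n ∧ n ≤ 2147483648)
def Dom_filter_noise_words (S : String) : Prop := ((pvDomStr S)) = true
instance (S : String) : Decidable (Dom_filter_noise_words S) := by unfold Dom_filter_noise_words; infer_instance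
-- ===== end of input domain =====

-- B replaces A's two-pointer slicing scan by a single char-at-a-time pass with a
-- five-state automaton (objective: alternative; same asymptotic cost).

-- ===== PORT A =====
-- inner loop 'while i + 1 < len(S) and S[i:i+2] == "da": i += 2' (returns the final i)
def innerA (l : List Char) (i : Nat) : Nat :=
  if i + 1 < l.length ∧ (l.drop i).take 2 = ['d', 'a'] then innerA l (i + 2) else i
termination_by l.length - i
decreasing_by omega

-- needed by aLoop's termination proof (cited in decreasing_by)
lemma innerA_ge (l : List Char) (i : Nat) : i ≤ innerA l i := by
  fun_induction innerA l i with
  | case1 i h ih => omega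
  | case2 i h => omega

-- the outer while loop; noise/out are the accumulated strings, i/j the two pointers.
-- A Python slice S[x:y] (0 ≤ x ≤ y) is (l.drop x).take (y - x): both clamp the same way.
def aLoop (l : List Char) (noise out : List Char) (i j : Nat) : List Char :=
  if i < l.length then
    if (l.drop i).take 3 = ['a', 'd', 'a'] then
      let i2 := innerA l (i + 3)
      aLoop l (noise ++ (l.drop i).take (i2 - i)) (out ++ (l.drop j).take (i - j)) i2 i2
    else
      aLoop l noise out (i + 1) j
  else
    out ++ (l.drop j).take (i - j) ++ noise
termination_by l.length - i
decreasing_by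
  · have := innerA_ge l (i + 3); omega
  · omega

def filter_noise_words (S : String) : String :=
  String.ofList (aLoop S.toList [] [] 0 0)

-- ===== PORT B =====
-- Source B's step0: state-0 handling of one char
def bStep0 (out noise : List Char) (c : Char) : Nat × List Char × List Char :=
  if c = 'a' then (1, out, noise) else (0, out ++ [c], noise)

-- one automaton step (the if/elif chain of Source B's for-body)
def bStep (acc : Nat × List Char × List Char) (c : Char) : Nat × List Char × List Char :=
  match acc with
  | (0, out, noise) => bStep0 out noise c
  | (1, out, noise) => if c = 'd' then (2, out, noise) else bStep0 (out ++ ['a']) noise c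
  | (2, out, noise) => if c = 'a' then (3, out, noise ++ ['a', 'd', 'a'])
                       else bStep0 (out ++ ['a', 'd']) noise c
  | (3, out, noise) => if c = 'd' then (4, out, noise) else bStep0 out noise c
  | (_, out, noise) => if c = 'a' then (3, out, noise ++ ['d', 'a'])
                       else bStep0 (out ++ ['d']) noise c

-- the final flush after the for loop
def bFlush (st : Nat) : List Char :=
  if st = 1 then ['a'] else if st = 2 then ['a', 'd'] else if st = 4 then ['d'] else []

def filter_noise_words_alt (S : String) : String :=
  let acc := S.toList.foldl bStep (0, [], [])
  String.ofList ((acc.2.1 ++ bFlush acc.1) ++ acc.2.2)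

-- ===== PRECONDITION & SPEC =====
def Spec_filter_noise_words (S : String) (out : String) : Prop := out = filter_noise_words_alt S
instance (S : String) (out : String) : Decidable (Spec_filter_noise_words S out) := by unfold Spec_filter_noise_words; infer_instance

-- ===== CLAIM (what is proved, stated in full; the proofs are below) =====
def Claim_equal_filter_noise_words : Prop := ∀ (S : String), Dom_filter_noise_words S → Spec_filter_noise_words S (filter_noise_words S)

-- ===== LEMMAS AND PROOFS =====

-- Reference splitter used only by the proofs: fRef l = (kept text, moved noise);
-- span2 takes the maximal ('d'::'a')* prefix.
def span2 : List Char → List Char × List Char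
  | 'd' :: 'a' :: t => ('d' :: 'a' :: (span2 t).1, (span2 t).2)
  | t => ([], t)

lemma span2_len (t : List Char) : (span2 t).2.length ≤ t.length := by
  fun_induction span2 t with
  | case1 t ih => simpa using by omega
  | case2 t _ => simp

def fRef : List Char → List Char × List Char
  | 'a' :: 'd' :: 'a' :: t =>
      ((fRef (span2 t).2).1, 'a' :: 'd' :: 'a' :: ((span2 t).1 ++ (fRef (span2 t).2).2))
  | c :: t => (c :: (fRef t).1, (fRef t).2)
  | [] => ([], [])
termination_by l => l.length
decreasing_by
  · have := span2_len t; simpa using by omega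
  · simp

-- equation lemmas for fRef under control of simple hypotheses
lemma fRef_nil : fRef [] = ([], []) := by simp [fRef]

lemma fRef_ada (t : List Char) :
    fRef ('a' :: 'd' :: 'a' :: t) =
      ((fRef (span2 t).2).1, 'a' :: 'd' :: 'a' :: ((span2 t).1 ++ (fRef (span2 t).2).2)) := by
  simp [fRef]

lemma fRef_cons (c : Char) (t : List Char) (h : ¬(c = 'a' ∧ t.take 2 = ['d', 'a'])) :
    fRef (c :: t) = (c :: (fRef t).1, (fRef t).2) := by
  rw [fRef.eq_def]
  split
  · simp_all
  · rename_i heq; injection heq with h1 h2; subst h1 h2; rfl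
  · simp_all

lemma span2_da (t : List Char) :
    span2 ('d' :: 'a' :: t) = ('d' :: 'a' :: (span2 t).1, (span2 t).2) := by
  simp [span2]

lemma span2_other (t : List Char) (h : t.take 2 ≠ ['d', 'a']) : span2 t = ([], t) := by
  rw [span2.eq_def]
  split
  · simp_all
  · rfl

-- ---- B side ----

def runB (acc : Nat × List Char × List Char) (l : List Char) : Nat × List Char × List Char :=
  l.foldl bStep acc

def finishB (acc : Nat × List Char × List Char) : List Char :=
  (acc.2.1 ++ bFlush acc.1) ++ acc.2.2

lemma runB_cons (acc : Nat × List Char × List Char) (c : Char) (t : List Char) :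
    runB acc (c :: t) = runB (bStep acc c) t := rfl

lemma runB_zero (o n : List Char) (c : Char) (t : List Char) :
    runB (bStep0 o n c) t = runB (0, o, n) (c :: t) := rfl

-- the state-0 and state-3 run properties, proved together by strong induction on length
lemma BMain : ∀ n : Nat,
    (∀ l : List Char, l.length ≤ n → ∀ out noise,
      finishB (runB (0, out, noise) l) = (out ++ (fRef l).1) ++ (noise ++ (fRef l).2)) ∧
    (∀ t : List Char, t.length ≤ n → ∀ out noise,
      finishB (runB (3, out, noise) t) =
        (out ++ (fRef (span2 t).2).1) ++ (noise ++ (span2 t).1 ++ (fRef (span2 t).2).2)) := by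
  intro n
  induction n using Nat.strong_induction_on with
  | _ n ih =>
    have h0 : ∀ l : List Char, l.length ≤ n → ∀ out noise,
        finishB (runB (0, out, noise) l) = (out ++ (fRef l).1) ++ (noise ++ (fRef l).2) := by
      intro l hl out noise
      rcases l with _ | ⟨c, t⟩
      · simp [runB, finishB, bFlush, fRef_nil, List.foldl]
      by_cases hca : c = 'a'
      · subst hca
        rcases t with _ | ⟨c1, t1⟩
        · rw [fRef_cons _ _ (by simp)]
          simp [runB, finishB, bFlush, bStep, bStep0, fRef_nil, List.foldl]
        by_cases hcd : c1 = 'd'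
        · subst hcd
          rcases t1 with _ | ⟨c2, t2⟩
          · rw [fRef_cons _ _ (by simp), fRef_cons _ _ (by simp)]
            simp [runB, finishB, bFlush, bStep, bStep0, fRef_nil, List.foldl]
          by_cases hc2 : c2 = 'a'
          · subst hc2
            rw [runB_cons, runB_cons, runB_cons]
            have hstep : bStep (bStep (bStep ((0 : Nat), out, noise) 'a') 'd') 'a'
                = (3, out, noise ++ ['a', 'd', 'a']) := by
              simp [bStep, bStep0]
            rw [hstep]
            have hn1 : n - 1 < n := by simp at hl; omega
            have h3 := (ih (n - 1) hn1).2 t2 (by simp at hl; omega) out (noise ++ ['a', 'd', 'a'])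
            rw [h3, fRef_ada]
            simp
          · rw [runB_cons, runB_cons, runB_cons]
            have hstep : bStep (bStep (bStep ((0 : Nat), out, noise) 'a') 'd') c2
                = bStep0 (out ++ ['a', 'd']) noise c2 := by
              simp [bStep, bStep0, hc2]
            rw [hstep, runB_zero]
            have hn1 : n - 1 < n := by simp at hl; omega
            have hrec := (ih (n - 1) hn1).1 (c2 :: t2) (by simp at hl ⊢; omega)
              (out ++ ['a', 'd']) noise
            rw [hrec]
            rw [fRef_cons 'a' ('d' :: c2 :: t2) (by simp [hc2]),
                fRef_cons 'd' (c2 :: t2) (by simp)]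
            simp
        · rw [runB_cons, runB_cons]
          have hstep : bStep (bStep ((0 : Nat), out, noise) 'a') c1
              = bStep0 (out ++ ['a']) noise c1 := by
            simp [bStep, bStep0, hcd]
          rw [hstep, runB_zero]
          have hn1 : n - 1 < n := by simp at hl; omega
          have hrec := (ih (n - 1) hn1).1 (c1 :: t1) (by simp at hl ⊢; omega) (out ++ ['a']) noise
          rw [hrec, fRef_cons 'a' (c1 :: t1) (by simp [hcd])]
          simp
      · rw [runB_cons]
        have hstep : bStep ((0 : Nat), out, noise) c = ((0 : Nat), out ++ [c], noise) := by
          simp [bStep, bStep0, hca]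
        rw [hstep]
        have hn1 : n - 1 < n := by simp at hl; omega
        have hrec := (ih (n - 1) hn1).1 t (by simp at hl; omega) (out ++ [c]) noise
        rw [hrec, fRef_cons c t (by simp [hca])]
        simp
    refine ⟨h0, ?_⟩
    intro t ht out noise
    rcases t with _ | ⟨c, t'⟩
    · rw [span2_other _ (by simp)]
      simp [runB, finishB, bFlush, fRef_nil, List.foldl]
    by_cases hcd : c = 'd'
    · subst hcd
      rcases t' with _ | ⟨c1, t1⟩
      · rw [span2_other _ (by simp), fRef_cons _ _ (by simp)]
        simp [runB, finishB, bFlush, bStep, fRef_nil, List.foldl]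
      by_cases hc1 : c1 = 'a'
      · subst hc1
        rw [runB_cons, runB_cons]
        have hstep : bStep (bStep ((3 : Nat), out, noise) 'd') 'a'
            = (3, out, noise ++ ['d', 'a']) := by
          simp [bStep]
        rw [hstep]
        have hn1 : n - 1 < n := by simp at ht; omega
        have hrec := (ih (n - 1) hn1).2 t1 (by simp at ht; omega) out (noise ++ ['d', 'a'])
        rw [hrec, span2_da]
        simp
      · rw [runB_cons, runB_cons]
        have hstep : bStep (bStep ((3 : Nat), out, noise) 'd') c1
            = bStep0 (out ++ ['d']) noise c1 := by
          simp [bStep, bStep0, hc1]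
        rw [hstep, runB_zero]
        have hrec := h0 (c1 :: t1) (by simp at ht ⊢; omega) (out ++ ['d']) noise
        rw [hrec, span2_other _ (by simp [hc1]), fRef_cons 'd' (c1 :: t1) (by simp)]
        simp
    · rw [runB_cons]
      have hstep : bStep ((3 : Nat), out, noise) c = bStep0 out noise c := by
        simp [bStep, hcd]
      rw [hstep, runB_zero]
      have hrec := h0 (c :: t') ht out noise
      rw [hrec, span2_other _ (by simp [hcd])]
      simp

lemma B0 (l : List Char) (out noise : List Char) :
    finishB (runB (0, out, noise) l) = (out ++ (fRef l).1) ++ (noise ++ (fRef l).2) :=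
  (BMain l.length).1 l le_rfl out noise

-- ---- A side ----

lemma take_split (l : List Char) (j i i' : Nat) (h1 : j ≤ i) (h2 : i ≤ i') :
    (l.drop j).take (i' - j) = (l.drop j).take (i - j) ++ (l.drop i).take (i' - i) := by
  have h : i' - j = (i - j) + (i' - i) := by omega
  rw [h, List.take_add, List.drop_drop]
  have h2 : j + (i - j) = i := by omega
  rw [h2]

lemma innerA_span2 (l : List Char) (i : Nat) :
    span2 (l.drop i) = ((l.drop i).take (innerA l i - i), l.drop (innerA l i)) := by
  fun_induction innerA l i with
  | case1 i h ih =>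
    have hun : innerA l i = innerA l (i + 2) := by rw [innerA, if_pos h]
    have hdrop : l.drop i = 'd' :: 'a' :: l.drop (i + 2) := by
      have := List.take_append_drop 2 (l.drop i)
      rw [h.2] at this
      rw [← this, List.drop_drop]
      rfl
    have hge : i + 2 ≤ innerA l (i + 2) := innerA_ge l (i + 2)
    have harith : innerA l (i + 2) - i = (innerA l (i + 2) - (i + 2)) + 1 + 1 := by omega
    rw [hdrop, span2_da, ih, harith, List.take_succ_cons, List.take_succ_cons]
  | case2 i h =>
    have hda : (l.drop i).take 2 ≠ ['d', 'a'] := by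
      intro hda
      apply h
      refine ⟨?_, hda⟩
      have := congrArg List.length hda
      simp at this
      omega
    rw [span2_other _ hda, Nat.sub_self, List.take_zero]

lemma aLoop_shift (l : List Char) :
    ∀ k i j noise out, l.length - i ≤ k → j ≤ i →
      aLoop l noise out i j = aLoop l noise (out ++ (l.drop j).take (i - j)) i i := by
  intro k
  induction k with
  | zero =>
    intro i j noise out hk hj
    have hi : ¬ i < l.length := by omega
    conv_lhs => rw [aLoop]
    conv_rhs => rw [aLoop]
    simp [if_neg hi]
  | succ k ihk =>
    intro i j noise out hk hj
    by_cases hi : i < l.length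
    · by_cases hm : (l.drop i).take 3 = ['a', 'd', 'a']
      · conv_lhs => rw [aLoop]
        conv_rhs => rw [aLoop]
        simp only [if_pos hi, if_pos hm, Nat.sub_self, List.take_zero, List.append_nil]
      · conv_lhs => rw [aLoop]
        conv_rhs => rw [aLoop]
        simp only [if_pos hi, if_neg hm]
        rw [ihk (i + 1) j noise out (by omega) (by omega),
            ihk (i + 1) i noise (out ++ (l.drop j).take (i - j)) (by omega) (by omega)]
        rw [take_split l j i (i + 1) hj (by omega)]
        simp
    · conv_lhs => rw [aLoop]
      conv_rhs => rw [aLoop]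
      simp only [if_neg hi, Nat.sub_self, List.take_zero, List.append_nil]

lemma A0 (l : List Char) :
    ∀ k i noise out, l.length - i ≤ k →
      aLoop l noise out i i = (out ++ (fRef (l.drop i)).1) ++ (noise ++ (fRef (l.drop i)).2) := by
  intro k
  induction k with
  | zero =>
    intro i noise out hk
    have hi : ¬ i < l.length := by omega
    rw [aLoop]
    simp only [if_neg hi, Nat.sub_self, List.take_zero, List.append_nil]
    rw [List.drop_eq_nil_of_le (by omega), fRef_nil]
    simp
  | succ k ihk =>
    intro i noise out hk
    by_cases hi : i < l.length
    · by_cases hm : (l.drop i).take 3 = ['a', 'd', 'a']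
      · rw [aLoop]
        simp only [if_pos hi, if_pos hm, Nat.sub_self, List.take_zero, List.append_nil]
        have hge : i + 3 ≤ innerA l (i + 3) := innerA_ge l (i + 3)
        have hdrop : l.drop i = 'a' :: 'd' :: 'a' :: l.drop (i + 3) := by
          have := List.take_append_drop 3 (l.drop i)
          rw [hm] at this
          rw [← this, List.drop_drop]
          rfl
        have hrec := ihk (innerA l (i + 3))
          (noise ++ (l.drop i).take (innerA l (i + 3) - i)) out (by omega)
        rw [hrec]
        have htake : (l.drop i).take (innerA l (i + 3) - i)
            = 'a' :: 'd' :: 'a' :: (l.drop (i + 3)).take (innerA l (i + 3) - (i + 3)) := by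
          have harith : innerA l (i + 3) - i = (innerA l (i + 3) - (i + 3)) + 1 + 1 + 1 := by
            omega
          rw [hdrop, harith, List.take_succ_cons, List.take_succ_cons, List.take_succ_cons]
        have hspan := innerA_span2 l (i + 3)
        rw [htake, hdrop, fRef_ada, hspan]
        simp
      · rw [aLoop]
        simp only [if_pos hi, if_neg hm]
        have hdropcons : l.drop i = l[i] :: l.drop (i + 1) := List.drop_eq_getElem_cons hi
        rw [aLoop_shift l (k + 1) (i + 1) i noise out (by omega) (by omega)]
        have htake1 : (l.drop i).take (i + 1 - i) = [l[i]] := by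
          have : i + 1 - i = 1 := by omega
          rw [this, hdropcons]
          rfl
        rw [htake1, ihk (i + 1) noise (out ++ [l[i]]) (by omega)]
        have hfr : fRef (l.drop i) = (l[i] :: (fRef (l.drop (i + 1))).1, (fRef (l.drop (i + 1))).2) := by
          rw [hdropcons]
          apply fRef_cons
          intro hcon
          apply hm
          rw [hdropcons, List.take_succ_cons, hcon.1, hcon.2]
        rw [hfr]
        simp
    · rw [aLoop]
      simp only [if_neg hi, Nat.sub_self, List.take_zero, List.append_nil]
      rw [List.drop_eq_nil_of_le (by omega), fRef_nil]
      simp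

-- ===== VERDICT (by name: the statement is the Claim_ definition above) =====
theorem filter_noise_words_spec : Claim_equal_filter_noise_words := by
  intro S _
  unfold Spec_filter_noise_words filter_noise_words filter_noise_words_alt
  have hA := A0 S.toList S.toList.length 0 [] [] (by omega)
  simp only [List.drop_zero] at hA
  have hB := B0 S.toList [] []
  simp only [runB, finishB] at hB
  simp only [List.nil_append, List.append_assoc] at hA hB
  simp only [hA, List.append_assoc, hB]
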